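-- pv_equiv track=rewrite | github.com/torbjorn-sorman/aoc | 2024/day/7/solution.py | _apply
-- ===== SOURCE A (Python) =====
-- def _apply(xs):
--     it = iter(xs)
--     result = next(it)
--     try:
--         while True:
--             _y = next(it)
--             if _y == 0:
--                 result = result + next(it)
--             elif _y == 1:
--                 result = result * next(it)
--             elif _y == 2:
--                 result = int(str(result) + str(next(it)))
--     except:
--         pass
--     return result
-- ===== SOURCE B (Python) =====
-- def _apply(xs):
--     # Stage 1: compile the token tail into a list of (op, operand) instructions,
--     # skipping unrecognised opcodes and dropping a trailing op with no operand.
--     prog = []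
--     i, n = 1, len(xs)
--     while i < n:
--         op = xs[i]
--         if op in (0, 1, 2):
--             if i + 1 >= n:
--                 break
--             prog.append((op, xs[i + 1]))
--             i += 2
--         else:
--             i += 1
--     # Stage 2: evaluate the instruction list over the accumulator.
--     result = xs[0]
--     for op, y in prog:
--         if op == 0:
--             result = result + y
--         elif op == 1:
--             result = result * y
--         else:
--             try:
--                 result = int(str(result) + str(y))
--             except ValueError:
--                 break
--     return result
-- ===== Notes on version B (the rewrite author's own statement) =====
-- stated objective: alternative
-- what changed: Splits A's single interleaved iterator/exception state machine into two staged passes: a compile pass that turns the token tail into an explicit (op, operand) instruction list, then a separate evaluation pass that folds those instructions over the accumulator.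
-- outside the precondition, e.g. on _apply([]): A raises StopIteration, B raises IndexError
import Mathlib
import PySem

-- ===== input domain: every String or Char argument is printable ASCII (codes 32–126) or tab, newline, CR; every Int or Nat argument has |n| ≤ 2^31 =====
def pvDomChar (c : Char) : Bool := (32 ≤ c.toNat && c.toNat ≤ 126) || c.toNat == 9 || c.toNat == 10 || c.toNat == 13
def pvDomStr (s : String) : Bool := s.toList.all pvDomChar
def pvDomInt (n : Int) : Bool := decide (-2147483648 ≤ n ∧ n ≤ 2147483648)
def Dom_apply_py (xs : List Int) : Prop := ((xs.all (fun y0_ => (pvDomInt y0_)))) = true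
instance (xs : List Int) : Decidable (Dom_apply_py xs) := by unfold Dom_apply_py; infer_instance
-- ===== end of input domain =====

-- B replaces A's interleaved iterator/exception state machine by two staged passes
-- (compile the tail to an instruction list, then evaluate it); same cost, no speed claim.

-- ===== PORT A =====
-- A's `while True` over the iterator: the remaining list IS the iterator state;
-- `next` on [] (StopIteration) ends the loop via the catch-all `except`.
-- `int(str(result) + str(next(it)))` is PySem.Int.ofChars? of the concatenated digit
-- strings; none (ValueError) is caught by the same catch-all and returns `result`.
def applyLoopA (result : Int) : List Int → Int
  | [] => result
  | op :: rest =>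
    if op = 0 then
      match rest with
      | [] => result
      | y :: r => applyLoopA (result + y) r
    else if op = 1 then
      match rest with
      | [] => result
      | y :: r => applyLoopA (result * y) r
    else if op = 2 then
      match rest with
      | [] => result
      | y :: r =>
        match PySem.Int.ofChars? (PySem.Int.toChars result ++ PySem.Int.toChars y) with
        | none => result
        | some v => applyLoopA v r
    else applyLoopA result rest

def apply_py (xs : List Int) : Int :=
  match xs with
  | [] => 0      -- unreachable under Pre_: Python raises StopIteration on []
  | r :: rest => applyLoopA r rest

-- ===== PORT B =====
-- Stage 1 of Source B: the index-based compile loop producing the (op, operand) program.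
def compileProg (xs : List Int) (i : Nat) : List (Int × Int) :=
  if _h : i < xs.length then
    let op := xs.getD i 0
    if op = 0 ∨ op = 1 ∨ op = 2 then
      if i + 1 ≥ xs.length then []
      else (op, xs.getD (i + 1) 0) :: compileProg xs (i + 2)
    else compileProg xs (i + 1)
  else []
termination_by xs.length - i
decreasing_by all_goals omega

-- Stage 2 of Source B: the `for op, y in prog` evaluation loop; the `break` on a
-- failing concatenation (ValueError) returns the current accumulator.
def evalProg (result : Int) : List (Int × Int) → Int
  | [] => result
  | (op, y) :: rest =>
    if op = 0 then evalProg (result + y) rest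
    else if op = 1 then evalProg (result * y) rest
    else
      match PySem.Int.ofChars? (PySem.Int.toChars result ++ PySem.Int.toChars y) with
      | some v => evalProg v rest
      | none => result

def apply_py_alt (xs : List Int) : Int :=
  match xs with
  | [] => 0      -- unreachable under Pre_: Python raises IndexError on []
  | r :: _ => evalProg r (compileProg xs 1)

-- ===== PRECONDITION & SPEC =====
-- Pre_ excludes only the empty list, on which A raises StopIteration (and B IndexError).
def Pre_apply_py (xs : List Int) : Prop := xs ≠ []
instance (xs : List Int) : Decidable (Pre_apply_py xs) := by unfold Pre_apply_py; infer_instance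
def pvWitness_apply_py : List Int := ([3, 1, 4, 0, 2])

def Spec_apply_py (xs : List Int) (out : Int) : Prop := out = apply_py_alt xs
instance (xs : List Int) (out : Int) : Decidable (Spec_apply_py xs out) := by unfold Spec_apply_py; infer_instance

-- ===== CLAIM (what is proved, stated in full; the proofs are below) =====
def Claim_equal_apply_py : Prop := ∀ (xs : List Int), Dom_apply_py xs → Pre_apply_py xs → Spec_apply_py xs (apply_py xs)

-- ===== LEMMAS AND PROOFS =====

lemma loop_eq (xs : List Int) :
    ∀ k i result, xs.length - i ≤ k →
      applyLoopA result (xs.drop i) = evalProg result (compileProg xs i) := by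
  intro k
  induction k with
  | zero =>
    intro i result h
    have hi : xs.length ≤ i := by omega
    rw [List.drop_eq_nil_of_le hi, compileProg]
    simp [Nat.not_lt.mpr hi]
    rfl
  | succ k ih =>
    intro i result h
    by_cases hi : i < xs.length
    · have hdrop : xs.drop i = xs[i] :: xs.drop (i + 1) := List.drop_eq_getElem_cons hi
      rw [hdrop, compileProg]
      simp only [hi, dif_pos]
      have hget : xs.getD i 0 = xs[i] := List.getD_eq_getElem xs 0 hi
      rw [hget]
      by_cases h0 : xs[i] = (0 : Int)
      · simp only [h0, true_or, if_pos]
        by_cases he : i + 1 ≥ xs.length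
        · rw [List.drop_eq_nil_of_le (by omega)]
          simp [he, applyLoopA, evalProg]
        · have hi1 : i + 1 < xs.length := by omega
          rw [List.drop_eq_getElem_cons hi1]
          simp only [he, List.getD_eq_getElem xs 0 hi1, applyLoopA]
          norm_num
          exact ih (i + 2) _ (by omega)
      · by_cases h1 : xs[i] = (1 : Int)
        · simp only [h1, true_or, or_true, if_pos]
          by_cases he : i + 1 ≥ xs.length
          · rw [List.drop_eq_nil_of_le (by omega)]
            simp [he, applyLoopA, evalProg]
          · have hi1 : i + 1 < xs.length := by omega
            rw [List.drop_eq_getElem_cons hi1]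
            simp only [he, List.getD_eq_getElem xs 0 hi1, applyLoopA]
            norm_num
            exact ih (i + 2) _ (by omega)
        · by_cases h2 : xs[i] = (2 : Int)
          · simp only [h2, or_true, if_pos]
            by_cases he : i + 1 ≥ xs.length
            · rw [List.drop_eq_nil_of_le (by omega)]
              simp [he, applyLoopA, evalProg]
            · have hi1 : i + 1 < xs.length := by omega
              rw [List.drop_eq_getElem_cons hi1]
              simp only [he, List.getD_eq_getElem xs 0 hi1, applyLoopA]
              rw [evalProg.eq_def]
              norm_num
              rcases PySem.Int.ofChars? (PySem.Int.toChars result ++ PySem.Int.toChars xs[i + 1]) with _ | v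
              · simp
              · exact ih (i + 2) _ (by omega)
          · have hno : ¬ (xs[i] = 0 ∨ xs[i] = 1 ∨ xs[i] = 2) := by tauto
            rw [if_neg hno, applyLoopA.eq_def]
            simp only []
            rw [if_neg h0, if_neg h1, if_neg h2]
            exact ih (i + 1) _ (by omega)
    · have hle : xs.length ≤ i := by omega
      rw [List.drop_eq_nil_of_le hle, compileProg]
      simp [Nat.not_lt.mpr hle]
      rfl

-- ===== VERDICT (by name: the statement is the Claim_ definition above) =====
theorem apply_py_spec : Claim_equal_apply_py := by
  intro xs _ hpre
  unfold Spec_apply_py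
  match xs, hpre with
  | r :: rest, _ =>
    show applyLoopA r rest = apply_py_alt (r :: rest)
    unfold apply_py_alt
    have := loop_eq (r :: rest) (r :: rest).length 1 r (by omega)
    simpa using this
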